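-- pv_equiv track=rewrite | github.com/devcarlos/ai-cookbook | knowledge/docling/pdf_to_markdown_processor.py | validate_article_sequence
-- ===== SOURCE A (Python) =====
-- from typing import List, Dict, Tuple
--
-- def validate_article_sequence(articles: List[Tuple[int, int, str]]) -> Tuple[bool, List[str]]:
--     """Validate that main articles (### level) are sequential. Returns (is_valid, issues)"""
--     if not articles:
--         return True, []
--
--     issues = []
--     main_articles = []
--     reference_articles = []
--
--     # Separate main articles (###) from reference articles (#### or #####)
--     for line_num, article_num, full_line in articles:
--         if full_line.startswith('###'):
--             main_articles.append((line_num, article_num, full_line))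
--         else:
--             reference_articles.append((line_num, article_num, full_line))
--
--     # Check main articles for sequential numbering (only ### level articles)
--     if main_articles:
--         expected_num = 1
--         for line_num, article_num, full_line in main_articles:
--             if article_num != expected_num:
--                 issues.append(f"Line {line_num}: Expected main ARTÍCULO {expected_num}, found ARTÍCULO {article_num}")
--             expected_num += 1
--
--     # Reference articles (#### level) can have any number - they are references within main articles
--     # No validation needed for reference articles as they can reference any article number
--
--     return len(issues) == 0, issues
-- ===== SOURCE B (Python) =====
-- def validate_article_sequence(articles):
--     """Reverse-traversal validation: count the main articles first, then walk the
--     list back-to-front with a decrementing expected counter, building the issue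
--     list back-to-front."""
--     expected = sum(1 for _, _, fl in articles if fl.startswith('###'))
--     rev_issues = []
--     for line_num, article_num, full_line in reversed(articles):
--         if full_line.startswith('###'):
--             if article_num != expected:
--                 rev_issues.append(f"Line {line_num}: Expected main ARTÍCULO {expected}, found ARTÍCULO {article_num}")
--             expected -= 1
--     rev_issues.reverse()
--     return not rev_issues, rev_issues
-- ===== Notes on version B (the rewrite author's own statement) =====
-- stated objective: alternative
-- what changed: Replaced A's partition-into-two-lists-then-forward-check design by a count-then-reverse traversal: B first counts the main articles, then walks the list backwards with a decrementing expected counter, building the issue list back-to-front and reversing it once at the end.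
import Mathlib
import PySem

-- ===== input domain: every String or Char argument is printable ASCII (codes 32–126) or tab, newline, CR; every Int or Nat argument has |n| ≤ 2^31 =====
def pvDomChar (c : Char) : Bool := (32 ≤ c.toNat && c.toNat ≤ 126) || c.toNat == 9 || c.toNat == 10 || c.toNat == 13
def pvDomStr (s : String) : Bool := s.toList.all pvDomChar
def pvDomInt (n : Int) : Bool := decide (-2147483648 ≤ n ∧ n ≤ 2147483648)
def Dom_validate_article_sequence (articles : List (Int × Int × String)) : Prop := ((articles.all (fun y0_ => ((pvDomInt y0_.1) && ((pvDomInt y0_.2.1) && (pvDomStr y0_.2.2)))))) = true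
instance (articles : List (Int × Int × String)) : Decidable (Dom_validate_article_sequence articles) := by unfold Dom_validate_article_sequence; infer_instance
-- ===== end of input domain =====

-- B replaces A's partition-then-forward-check by a count-then-reverse traversal with a decrementing counter (objective: alternative); same return value on all inputs.


-- shared message formatter (the f-string both Pythons contain verbatim)
def pvMsg (ln e an : Int) : String :=
  "Line " ++ PySem.Int.toStr ln ++ ": Expected main ARTÍCULO " ++ PySem.Int.toStr e ++ ", found ARTÍCULO " ++ PySem.Int.toStr an

-- ===== PORT A =====
-- A's second loop over the materialized main_articles list
def pvCheckLoop : List (Int × Int × String) → Int → List String → List String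
  | [], _, issues => issues
  | (ln, an, _) :: rest, e, issues =>
      pvCheckLoop rest (e + 1) (if an ≠ e then issues ++ [pvMsg ln e an] else issues)

def validate_article_sequence (articles : List (Int × Int × String)) : Bool × List String :=
  if articles = [] then (true, [])
  else
    -- partition pass, then check pass over main_articles (part.1)
    ((fun issues => ((issues.length == 0 : Bool), issues))
      ((fun part => if part.1 ≠ ([] : List (Int × Int × String)) then pvCheckLoop part.1 1 [] else [])
        (articles.foldl
          (fun (acc : List (Int × Int × String) × List (Int × Int × String)) t =>
            if PySem.Str.startswith t.2.2 "###" then (acc.1 ++ [t], acc.2) else (acc.1, acc.2 ++ [t]))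
          ([], []))))

-- ===== PORT B =====
def validate_article_sequence_alt (articles : List (Int × Int × String)) : Bool × List String :=
  -- count of main articles, then a backward walk checking against a decrementing expected counter
  ((fun issues => ((issues.isEmpty : Bool), issues))
    ((articles.reverse.foldl
        (fun (st : Int × List String) t =>
          if PySem.Str.startswith t.2.2 "###" then
            (st.1 - 1, if t.2.1 ≠ st.1 then st.2 ++ [pvMsg t.1 st.1 t.2.1] else st.2)
          else st)
        (articles.foldl
          (fun (s : Int) t => if PySem.Str.startswith t.2.2 "###" then s + 1 else s) 0, [])).2.reverse))

-- ===== PRECONDITION & SPEC =====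
def Spec_validate_article_sequence (articles : List (Int × Int × String)) (out : Bool × List String) : Prop := out = validate_article_sequence_alt articles
instance (articles : List (Int × Int × String)) (out : Bool × List String) : Decidable (Spec_validate_article_sequence articles out) := by unfold Spec_validate_article_sequence; infer_instance

-- ===== CLAIM (what is proved, stated in full; the proofs are below) =====
def Claim_equal_validate_article_sequence : Prop := ∀ (articles : List (Int × Int × String)), Dom_validate_article_sequence articles → Spec_validate_article_sequence articles (validate_article_sequence articles)

-- ===== LEMMAS AND PROOFS =====

-- the issue list produced by a forward sequential check starting at e
def pvIss : List (Int × Int × String) → Int → List String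
  | [], _ => []
  | (ln, an, _) :: rest, e => (if an ≠ e then [pvMsg ln e an] else []) ++ pvIss rest (e + 1)

-- A's partition fold accumulates exactly the filters
theorem pv_part_eq (xs : List (Int × Int × String))
    (m r : List (Int × Int × String)) :
    xs.foldl
      (fun (acc : List (Int × Int × String) × List (Int × Int × String)) t =>
        if PySem.Str.startswith t.2.2 "###" then (acc.1 ++ [t], acc.2) else (acc.1, acc.2 ++ [t]))
      (m, r)
    = (m ++ xs.filter (fun t => PySem.Str.startswith t.2.2 "###"),
       r ++ xs.filter (fun t => ¬ PySem.Str.startswith t.2.2 "###")) := by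
  induction xs generalizing m r with
  | nil => simp
  | cons x xs ih =>
    rw [List.foldl_cons]
    by_cases h : PySem.Str.startswith x.2.2 "###" = true
    · show List.foldl _ (if PySem.Str.startswith x.2.2 "###" = true then _ else _) xs = _
      rw [if_pos h, ih]
      simp [show PySem.Chars.startswith x.2.2.toList ['#', '#', '#'] = true by simpa using h]
    · show List.foldl _ (if PySem.Str.startswith x.2.2 "###" = true then _ else _) xs = _
      rw [if_neg h, ih]
      simp [show PySem.Chars.startswith x.2.2.toList ['#', '#', '#'] = false by simpa using h]

-- a Python `len(l) == 0` test agrees with a `not l` test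
theorem pv_len_beq_isEmpty (l : List String) : ((l.length == 0 : Bool)) = l.isEmpty := by
  cases l <;> rfl

-- A's check loop is the forward issue list appended to the accumulator
theorem pv_checkLoop_eq (l : List (Int × Int × String)) (e : Int) (acc : List String) :
    pvCheckLoop l e acc = acc ++ pvIss l e := by
  induction l generalizing e acc with
  | nil => simp [pvCheckLoop, pvIss]
  | cons x xs ih =>
    obtain ⟨ln, an, fl⟩ := x
    by_cases h : an = e <;> simp [pvCheckLoop, pvIss, h, ih]

-- B's counting fold computes the length of the filtered list
theorem pv_count_eq (xs : List (Int × Int × String)) (n : Int) :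
    xs.foldl (fun (s : Int) t => if PySem.Str.startswith t.2.2 "###" then s + 1 else s) n
    = n + ((xs.filter (fun t => PySem.Str.startswith t.2.2 "###")).length : Int) := by
  induction xs generalizing n with
  | nil => simp
  | cons x xs ih =>
    rw [List.foldl_cons]
    by_cases h : PySem.Str.startswith x.2.2 "###" = true
    · rw [if_pos h, ih,
          List.filter_cons_of_pos (p := fun t => PySem.Str.startswith t.2.2 "###")
            (a := x) (l := xs) h, List.length_cons]
      push_cast; ring
    · rw [if_neg h, ih,
          List.filter_cons_of_neg (p := fun t => PySem.Str.startswith t.2.2 "###")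
            (a := x) (l := xs) (by simpa using h)]

-- B's backward fold, started at e + (number of mains), produces the reversed forward issues
theorem pv_revfold_eq (xs : List (Int × Int × String)) (e : Int) (r : List String) :
    xs.reverse.foldl
      (fun (st : Int × List String) t =>
        if PySem.Str.startswith t.2.2 "###" then
          (st.1 - 1, if t.2.1 ≠ st.1 then st.2 ++ [pvMsg t.1 st.1 t.2.1] else st.2)
        else st)
      (e + ((xs.filter (fun t => PySem.Str.startswith t.2.2 "###")).length : Int), r)
    = (e, r ++ (pvIss (xs.filter (fun t => PySem.Str.startswith t.2.2 "###")) (e + 1)).reverse) := by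
  induction xs generalizing e r with
  | nil => simp [pvIss]
  | cons x xs ih =>
    obtain ⟨ln, an, fl⟩ := x
    rw [List.reverse_cons, List.foldl_append]
    by_cases h : PySem.Str.startswith fl "###" = true
    · have hlen : ((((ln, an, fl) :: xs).filter (fun t => PySem.Str.startswith t.2.2 "###")).length : Int)
          = ((xs.filter (fun t => PySem.Str.startswith t.2.2 "###")).length : Int) + 1 := by
        rw [List.filter_cons_of_pos (p := fun t => PySem.Str.startswith t.2.2 "###")
              (a := (ln, an, fl)) (l := xs) h, List.length_cons]; push_cast; ring
      rw [hlen, show e + (((xs.filter (fun t => PySem.Str.startswith t.2.2 "###")).length : Int) + 1)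
            = (e + 1) + ((xs.filter (fun t => PySem.Str.startswith t.2.2 "###")).length : Int) by ring,
          ih (e + 1) r, List.foldl_cons, List.foldl_nil]
      rw [List.filter_cons_of_pos (p := fun t => PySem.Str.startswith t.2.2 "###")
            (a := (ln, an, fl)) (l := xs) h]
      have hc : PySem.Chars.startswith fl.toList ['#', '#', '#'] = true := by simpa using h
      by_cases han : an = e + 1
      · simp [pvIss, hc, han]
      · simp [pvIss, hc, han, List.append_assoc]
    · rw [List.filter_cons_of_neg (p := fun t => PySem.Str.startswith t.2.2 "###")
            (a := (ln, an, fl)) (l := xs) (by simpa using h),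
          ih e r, List.foldl_cons, List.foldl_nil]
      simp [show PySem.Chars.startswith fl.toList ['#', '#', '#'] = false by simpa using h]

-- ===== VERDICT (by name: the statement is the Claim_ definition above) =====
theorem validate_article_sequence_spec : Claim_equal_validate_article_sequence := by
  intro articles _
  unfold Spec_validate_article_sequence validate_article_sequence validate_article_sequence_alt
  have hrev := pv_revfold_eq articles 0 []
  rw [zero_add, List.nil_append] at hrev
  rw [pv_count_eq, zero_add, hrev]
  simp only [pv_part_eq, List.nil_append, List.reverse_reverse]
  by_cases hnil : articles = []
  · subst hnil; simp [pvIss]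
  · rw [if_neg hnil]
    by_cases hm : articles.filter (fun t => PySem.Str.startswith t.2.2 "###") = []
    · rw [hm, if_neg (by simp)]
      simp [pvIss]
    · rw [if_pos hm, pv_checkLoop_eq]
      simp [pv_len_beq_isEmpty]
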